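-- pv_equiv track=rewrite | github.com/RevolutionMedia-AI/Agent_IA_Server | STT_server/STT_Server.py | split_tts_segments
-- ===== SOURCE A (Python) =====
-- def split_tts_segments(text: str, max_chars: int = 350) -> list[str]:
--     stripped = text.strip()
--     if not stripped:
--         return []
--
--     segments: list[str] = []
--     current: list[str] = []
--     count = 0
--
--     for char in stripped:
--         current.append(char)
--         count += 1
--         if char in ".!?" and count >= 40:
--             segment = "".join(current).strip()
--             if segment:
--                 segments.append(segment)
--             current = []
--             count = 0
--         elif count >= max_chars:
--             segment = "".join(current).strip()
--             if segment:
--                 segments.append(segment)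
--             current = []
--             count = 0
--
--     if current:
--         segment = "".join(current).strip()
--         if segment:
--             segments.append(segment)
--
--     return segments
-- ===== SOURCE B (Python) =====
-- def split_tts_segments(text: str, max_chars: int = 350) -> list[str]:
--     s = text.strip()
--     segments: list[str] = []
--     while s:
--         n = len(s)
--         L = 1
--         while L < n and not ((s[L - 1] in ".!?" and L >= 40) or L >= max_chars):
--             L += 1
--         piece = s[:L].strip()
--         if piece:
--             segments.append(piece)
--         s = s[L:]
--     return segments
-- ===== Notes on version B (the rewrite author's own statement) =====
-- stated objective: alternative
-- what changed: A accumulates a per-segment char buffer plus counter inside one char-at-a-time for-loop; B works segment-at-a-time over the stripped string: an inner index scan finds the cut position (first sentence punctuation at length >= 40, or length >= max_chars), slices that segment off, and repeats on the remainder.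
import Mathlib
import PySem

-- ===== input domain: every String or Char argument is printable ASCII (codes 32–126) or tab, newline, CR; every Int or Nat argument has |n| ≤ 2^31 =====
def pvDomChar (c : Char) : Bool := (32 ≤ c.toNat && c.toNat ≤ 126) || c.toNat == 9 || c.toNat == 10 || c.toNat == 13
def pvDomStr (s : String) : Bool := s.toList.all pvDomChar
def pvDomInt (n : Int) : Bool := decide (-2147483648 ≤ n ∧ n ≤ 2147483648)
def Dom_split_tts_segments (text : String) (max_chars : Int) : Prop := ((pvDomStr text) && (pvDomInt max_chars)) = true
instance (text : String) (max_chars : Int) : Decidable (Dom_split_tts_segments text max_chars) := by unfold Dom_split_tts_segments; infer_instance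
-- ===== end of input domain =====

-- B rewrites the char-at-a-time accumulator as a segment-at-a-time index scan (same cost); equivalence of the two decompositions is proved below.

-- `char in ".!?"` (exact: membership in a 3-char string)
def pvPunct (c : Char) : Bool := c == '.' || c == '!' || c == '?'

-- `segment = "".join(current).strip(); if segment: segments.append(segment)` — shared by both Pythons verbatim
def pvEmit (cur : List Char) : List String :=
  let seg := PySem.Chars.strip cur
  if seg ≠ [] then [String.mk seg] else []

-- ===== PORT A =====
-- the body of A's for-loop, state = (segments, current, count)
def pvAStep (mc : Int) (st : List String × List Char × Int) (c : Char) :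
    List String × List Char × Int :=
  let cur := st.2.1 ++ [c]
  let cnt := st.2.2 + 1
  if pvPunct c = true ∧ 40 ≤ cnt then (st.1 ++ pvEmit cur, [], 0)
  else if mc ≤ cnt then (st.1 ++ pvEmit cur, [], 0)
  else (st.1, cur, cnt)

def split_tts_segments (text : String) (max_chars : Int) : List String :=
  let stripped := PySem.Chars.strip text.toList
  if stripped = [] then []
  else
    let st := stripped.foldl (pvAStep max_chars) ([], [], 0)
    if st.2.1 ≠ [] then st.1 ++ pvEmit st.2.1 else st.1

-- ===== PORT B =====
-- B's inner while: smallest position L (1-based) where the cut condition fires, capped at len(s);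
-- s.getD (L-1) is exact here since the loop guard keeps L-1 in range
def pvBFind (s : List Char) (mc : Int) (L : Nat) : Nat :=
  if h : L < s.length ∧
      ¬ ((pvPunct (s.getD (L - 1) ' ') = true ∧ 40 ≤ (L : Int)) ∨ mc ≤ (L : Int)) then
    pvBFind s mc (L + 1)
  else L
termination_by s.length - L
decreasing_by omega

theorem pvBFind_ge (s : List Char) (mc : Int) (L : Nat) : L ≤ pvBFind s mc L := by
  unfold pvBFind
  split
  · exact le_trans (Nat.le_succ L) (pvBFind_ge s mc (L + 1))
  · exact le_refl L
termination_by s.length - L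
decreasing_by omega

-- B's outer while loop (one segment per iteration)
def pvBCore (mc : Int) (s : List Char) : List String :=
  if hs : s = [] then []
  else
    let L := pvBFind s mc 1
    pvEmit (s.take L) ++ pvBCore mc (s.drop L)
termination_by s.length
decreasing_by
  have h1 : 1 ≤ pvBFind s mc 1 := pvBFind_ge s mc 1
  have h2 : s.length ≠ 0 := fun h => hs (List.eq_nil_of_length_eq_zero h)
  simp [List.length_drop]; omega

def split_tts_segments_alt (text : String) (max_chars : Int) : List String :=
  pvBCore max_chars (PySem.Chars.strip text.toList)

-- ===== PRECONDITION & SPEC =====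
def Spec_split_tts_segments (text : String) (max_chars : Int) (out : List String) : Prop := out = split_tts_segments_alt text max_chars
instance (text : String) (max_chars : Int) (out : List String) : Decidable (Spec_split_tts_segments text max_chars out) := by unfold Spec_split_tts_segments; infer_instance

-- ===== CLAIM (what is proved, stated in full; the proofs are below) =====
def Claim_equal_split_tts_segments : Prop := ∀ (text : String) (max_chars : Int), Dom_split_tts_segments text max_chars → Spec_split_tts_segments text max_chars (split_tts_segments text max_chars)

-- ===== LEMMAS AND PROOFS =====

-- the cut condition at 1-based position k on char c
def pvCond (mc : Int) (c : Char) (k : Nat) : Prop :=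
  (pvPunct c = true ∧ 40 ≤ (k : Int)) ∨ mc ≤ (k : Int)

theorem pvBFind_eq (s : List Char) (mc : Int) (M L : Nat) (h1 : 1 ≤ L) (hLM : L ≤ M)
    (hM : M ≤ s.length)
    (hnone : ∀ k, L ≤ k → k < M → ¬ pvCond mc (s.getD (k - 1) ' ') k)
    (hMc : M = s.length ∨ pvCond mc (s.getD (M - 1) ' ') M) :
    pvBFind s mc L = M := by
  rw [pvBFind]
  by_cases hEq : L = M
  · subst hEq
    split
    · rename_i h
      exfalso
      rcases hMc with h' | h'
      · omega
      · exact h.2 (by unfold pvCond at h'; exact h')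
    · rfl
  · have hlt : L < M := lt_of_le_of_ne hLM hEq
    split
    · exact pvBFind_eq s mc M (L + 1) (by omega) hlt hM
        (fun k hk1 hk2 => hnone k (by omega) hk2) hMc
    · rename_i h
      exfalso
      push_neg at h
      have hcond := h (by omega)
      exact hnone L le_rfl hlt (by unfold pvCond; exact hcond)
termination_by M - L
decreasing_by omega

theorem pvLoopA_eq (mc : Int) (cs : List Char) :
    ∀ (cur : List Char) (segs : List String),
    (∀ k, 1 ≤ k → k ≤ cur.length → ¬ pvCond mc (cur.getD (k - 1) ' ') k) →
    (cs.foldl (pvAStep mc) (segs, cur, (cur.length : Int))).1 ++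
      pvEmit (cs.foldl (pvAStep mc) (segs, cur, (cur.length : Int))).2.1
      = segs ++ pvBCore mc (cur ++ cs) := by
  induction cs with
  | nil =>
    intro cur segs hcur
    simp only [List.foldl_nil, List.append_nil]
    by_cases hnil : cur = []
    · subst hnil
      rw [show pvEmit [] = [] from by decide, show pvBCore mc [] = [] from by simp [pvBCore]]
    · conv_rhs => rw [pvBCore]
      rw [dif_neg hnil]
      have hlen : 1 ≤ cur.length := by
        cases cur with
        | nil => exact absurd rfl hnil
        | cons a t => simp
      have hfind : pvBFind cur mc 1 = cur.length :=
        pvBFind_eq cur mc cur.length 1 le_rfl hlen le_rfl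
          (fun k hk1 hk2 => hcur k hk1 (by omega)) (Or.inl rfl)
      rw [hfind]
      simp [show pvBCore mc [] = [] from by simp [pvBCore]]
  | cons c cs ih =>
    intro cur segs hcur
    simp only [List.foldl_cons]
    by_cases hc : pvCond mc c (cur.length + 1)
    · have hstep : pvAStep mc (segs, cur, (cur.length : Int)) c
          = (segs ++ pvEmit (cur ++ [c]), [], 0) := by
        unfold pvCond at hc
        push_cast at hc
        unfold pvAStep
        dsimp only
        split_ifs with h1 h2
        · rfl
        · rfl
        · exfalso
          rcases hc with h | h
          · exact h1 h
          · exact h2 h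
      rw [hstep]
      have h0 : (0 : Int) = (([] : List Char).length : Int) := by simp
      rw [h0, ih [] (segs ++ pvEmit (cur ++ [c])) (by intro k hk1 hk2; simp at hk2; omega)]
      have hne : cur ++ c :: cs ≠ [] := by simp
      conv_rhs => rw [pvBCore]
      rw [dif_neg hne]
      have hfind : pvBFind (cur ++ c :: cs) mc 1 = cur.length + 1 := by
        apply pvBFind_eq
        · omega
        · omega
        · simp only [List.length_append, List.length_cons]; omega
        · intro k hk1 hk2
          have heq : (cur ++ c :: cs).getD (k - 1) ' ' = cur.getD (k - 1) ' ' := by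
            rw [List.getD_append]
            omega
          rw [heq]
          exact hcur k hk1 (by omega)
        · right
          have heq : (cur ++ c :: cs).getD (cur.length + 1 - 1) ' ' = c := by
            simp
          rw [heq]
          exact hc
      rw [hfind]
      have htake : (cur ++ c :: cs).take (cur.length + 1) = cur ++ [c] := by
        rw [List.take_append]
        simp
      have hdrop : (cur ++ c :: cs).drop (cur.length + 1) = cs := by
        have := List.drop_append (l₁ := cur) (l₂ := c :: cs) (i := 1)
        simpa using this
      dsimp only
      rw [htake, hdrop]
      simp
    · have hstep : pvAStep mc (segs, cur, (cur.length : Int)) c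
          = (segs, cur ++ [c], (cur.length : Int) + 1) := by
        unfold pvCond at hc
        push_cast at hc
        unfold pvAStep
        dsimp only
        split_ifs with h1 h2
        · exact absurd (Or.inl h1) hc
        · exact absurd (Or.inr h2) hc
        · rfl
      rw [hstep]
      have hlen2 : ((cur.length : Int) + 1) = (((cur ++ [c]).length : Nat) : Int) := by
        simp
      have hyp2 : ∀ k, 1 ≤ k → k ≤ (cur ++ [c]).length →
          ¬ pvCond mc ((cur ++ [c]).getD (k - 1) ' ') k := by
        intro k hk1 hk2
        simp only [List.length_append, List.length_cons, List.length_nil] at hk2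
        by_cases hk : k ≤ cur.length
        · have heq : (cur ++ [c]).getD (k - 1) ' ' = cur.getD (k - 1) ' ' := by
            rw [List.getD_append]
            omega
          rw [heq]
          exact hcur k hk1 hk
        · have hkk : k = cur.length + 1 := by omega
          subst hkk
          have heq : (cur ++ [c]).getD (cur.length + 1 - 1) ' ' = c := by
            simp
          rw [heq]
          exact hc
      rw [hlen2, ih (cur ++ [c]) segs hyp2]
      simp

-- ===== VERDICT (by name: the statement is the Claim_ definition above) =====
theorem split_tts_segments_spec : Claim_equal_split_tts_segments := by
  intro text mc _
  unfold Spec_split_tts_segments split_tts_segments split_tts_segments_alt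
  dsimp only
  by_cases h : PySem.Chars.strip text.toList = []
  · rw [if_pos h, h, show pvBCore mc [] = [] from by simp [pvBCore]]
  · rw [if_neg h]
    have key := pvLoopA_eq mc (PySem.Chars.strip text.toList) [] []
      (by intro k hk1 hk2; simp at hk2; omega)
    simp only [List.length_nil, Nat.cast_zero, List.nil_append] at key
    split_ifs with hcur
    · exact key
    · rw [not_not] at hcur
      rw [← key, hcur, show pvEmit [] = [] from by decide, List.append_nil]
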